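-- pv_equiv track=rewrite | github.com/christabor/MoAL | MOAL/computer_organization/skew_binary.py | skew_to_dec
-- ===== SOURCE A (Python) =====
-- def skew_to_dec(dec):
--     res = 0
--     if dec == 0 or dec == 1:
--         return dec
--     for n, digit in enumerate(reversed(list(str(dec)))):
--         n = n + 1
--         out = int(digit) * (2 ** n - 1)
--         res += out
--     return int(res)
-- ===== SOURCE B (Python) =====
-- def skew_to_dec(dec):
--     binval = 0
--     digitsum = 0
--     for ch in str(dec):
--         d = int(ch)
--         binval = binval * 2 + d
--         digitsum += d
--     return 2 * binval - digitsum
-- ===== Notes on version B (the rewrite author's own statement) =====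
-- stated objective: simpler
-- what changed: Replaces the reversed-enumerate loop with per-digit exponentiation by a single forward Horner pass accumulating binval and digitsum, returning twice binval minus digitsum, and drops A's redundant early-return guard (the loop already handles those cases).
import Mathlib
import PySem

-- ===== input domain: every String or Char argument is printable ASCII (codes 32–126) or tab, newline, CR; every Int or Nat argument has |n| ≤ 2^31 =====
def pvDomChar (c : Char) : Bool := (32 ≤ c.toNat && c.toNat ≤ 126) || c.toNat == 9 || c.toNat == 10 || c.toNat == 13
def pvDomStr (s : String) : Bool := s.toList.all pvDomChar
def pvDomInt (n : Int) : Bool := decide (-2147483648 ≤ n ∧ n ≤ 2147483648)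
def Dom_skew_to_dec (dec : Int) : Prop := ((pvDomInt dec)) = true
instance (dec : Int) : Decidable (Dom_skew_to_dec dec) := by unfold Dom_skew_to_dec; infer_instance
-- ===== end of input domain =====

-- B replaces A's reversed-enumerate loop with per-digit exponentiation by one forward
-- Horner pass (binval, digitsum) returning twice binval minus digitsum: simpler, same result.
-- Pre_ excludes dec < 0, where both Pythons raise ValueError on int('-').

-- ===== PORT A =====
-- int(ch) for a single character; exact on '0'..'9', the only characters that
-- str(dec) contains for dec >= 0 (guaranteed by Pre_).
def pvDigitVal (c : Char) : Int := (c.toNat : Int) - 48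

def skew_to_dec (dec : Int) : Int :=
  if dec = 0 ∨ dec = 1 then dec
  else
    (PySem.List.enumerate ((PySem.Int.toStr dec).toList.reverse) 0).foldl
      (fun res p => res + pvDigitVal p.2 * (2 ^ (p.1 + 1).toNat - 1)) 0

-- ===== PORT B =====
def skew_to_dec_alt (dec : Int) : Int :=
  let bs := ((PySem.Int.toStr dec).toList).foldl
    (fun (acc : Int × Int) ch => (acc.1 * 2 + pvDigitVal ch, acc.2 + pvDigitVal ch)) (0, 0)
  2 * bs.1 - bs.2

-- ===== PRECONDITION & SPEC =====
-- Pre_: dec >= 0; for negative dec both A and B raise ValueError (int('-')).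
def Pre_skew_to_dec (dec : Int) : Prop := 0 ≤ dec
instance (dec : Int) : Decidable (Pre_skew_to_dec dec) := by unfold Pre_skew_to_dec; infer_instance
def pvWitness_skew_to_dec : Int := 120
def Spec_skew_to_dec (dec : Int) (out : Int) : Prop := out = skew_to_dec_alt dec
instance (dec : Int) (out : Int) : Decidable (Spec_skew_to_dec dec out) := by unfold Spec_skew_to_dec; infer_instance

-- ===== CLAIM (what is proved, stated in full; the proofs are below) =====
def Claim_equal_skew_to_dec : Prop := ∀ (dec : Int), Dom_skew_to_dec dec → Pre_skew_to_dec dec → Spec_skew_to_dec dec (skew_to_dec dec)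

-- ===== LEMMAS AND PROOFS =====

-- The Horner fold from an arbitrary accumulator.
theorem pv_horner_shift (l : List Char) (b : Int) :
    l.foldl (fun b c => b * 2 + pvDigitVal c) b
      = b * 2 ^ l.length + l.foldl (fun b c => b * 2 + pvDigitVal c) 0 := by
  induction l generalizing b with
  | nil => simp
  | cons c t ih =>
    simp only [List.foldl_cons, List.length_cons]
    rw [ih (b * 2 + pvDigitVal c), ih (0 * 2 + pvDigitVal c)]
    ring

-- The digit-sum fold from an arbitrary accumulator.
theorem pv_sum_shift (l : List Char) (s : Int) :
    l.foldl (fun s c => s + pvDigitVal c) s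
      = s + l.foldl (fun s c => s + pvDigitVal c) 0 := by
  induction l generalizing s with
  | nil => simp
  | cons c t ih =>
    simp only [List.foldl_cons]
    rw [ih (s + pvDigitVal c), ih (0 + pvDigitVal c)]
    ring

-- B's pair fold is the Horner fold paired with the digit-sum fold.
theorem pv_pair_fold (l : List Char) (b s : Int) :
    l.foldl (fun (acc : Int × Int) ch => (acc.1 * 2 + pvDigitVal ch, acc.2 + pvDigitVal ch)) (b, s)
      = (l.foldl (fun b c => b * 2 + pvDigitVal c) b,
         l.foldl (fun s c => s + pvDigitVal c) s) := by
  induction l generalizing b s with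
  | nil => rfl
  | cons c t ih => simp only [List.foldl_cons]; exact ih _ _

-- A's reversed-enumerate sum equals 2*Horner - digitsum.
theorem pv_key (l : List Char) :
    (PySem.List.enumerate l.reverse 0).foldl
      (fun res p => res + pvDigitVal p.2 * (2 ^ (p.1 + 1).toNat - 1)) 0
    = 2 * l.foldl (fun b c => b * 2 + pvDigitVal c) 0
        - l.foldl (fun s c => s + pvDigitVal c) 0 := by
  induction l with
  | nil => rfl
  | cons c t ih =>
    have hrev : (c :: t).reverse = t.reverse ++ [c] := by simp
    rw [hrev, PySem.List.enumerate_append, List.foldl_append]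
    simp only [PySem.List.enumerate_cons, PySem.List.enumerate_nil, List.foldl_cons,
      List.foldl_nil, List.length_reverse]
    rw [ih]
    have htn : ((0 : Int) + (t.length : Int) + 1).toNat = t.length + 1 := by omega
    rw [htn]
    rw [pv_horner_shift t (0 * 2 + pvDigitVal c), pv_sum_shift t (0 + pvDigitVal c), pow_succ]
    ring

-- ===== VERDICT (by name: the statement is the Claim_ definition above) =====
theorem skew_to_dec_spec : Claim_equal_skew_to_dec := by
  intro dec _ _
  unfold Spec_skew_to_dec skew_to_dec skew_to_dec_alt
  by_cases h : dec = 0 ∨ dec = 1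
  · rcases h with h | h <;> subst h <;> decide
  · rw [if_neg h, pv_key, pv_pair_fold]
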